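-- pv_equiv track=rewrite | github.com/dc-carrolls/carrolls-classwork4 | spygame2.py | gen_inc_nz_integers
-- ===== SOURCE A (Python) =====
-- def gen_inc_nz_integers(n):
--     i=1
--     while i != n:
--         yield i
--         if i < 0:
--             i = -i + 1
--         else:
--             i = -i
-- ===== SOURCE B (Python) =====
-- def gen_inc_nz_integers(n):
--     # Closed form: the stream 1,-1,2,-2,... truncated before n has a
--     # precomputable length m; generate element j directly from its index.
--     m = 2 * (n - 1) if n > 0 else 2 * (-n) - 1
--     for j in range(m):
--         k = j // 2 + 1
--         yield k if j % 2 == 0 else -k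
-- ===== Notes on version B (the rewrite author's own statement) =====
-- stated objective: alternative
-- what changed: B replaces A's sentinel-tested state-flipping loop by a closed form: it precomputes the exact output length m from n and generates element j directly from its index as +-(j//2+1) over range(m), with no stop test inside the loop.
import Mathlib
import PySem

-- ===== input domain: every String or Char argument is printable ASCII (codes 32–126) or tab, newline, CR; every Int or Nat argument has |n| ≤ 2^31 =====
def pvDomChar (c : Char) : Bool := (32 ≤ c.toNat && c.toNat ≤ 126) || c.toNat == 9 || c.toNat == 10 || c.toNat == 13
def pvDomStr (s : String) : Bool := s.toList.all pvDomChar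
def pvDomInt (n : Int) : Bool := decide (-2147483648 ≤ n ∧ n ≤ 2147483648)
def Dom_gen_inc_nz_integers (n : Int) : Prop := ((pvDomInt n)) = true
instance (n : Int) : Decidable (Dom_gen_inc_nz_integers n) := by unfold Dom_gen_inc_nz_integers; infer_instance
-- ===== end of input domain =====

-- B computes the output length in closed form and generates each element directly
-- from its index over range(m), instead of A's sentinel-tested sign-flipping loop.

-- ===== PORT A =====
-- A's while loop: signed state i starting at 1; yield i, then flip i -> -i (or -i+1 when i<0).
-- Fuel 2*|n| bounds the number of loop iterations (the loop runs at most 2|n|-1 times for n ≠ 0).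
def genA_loop (n i : Int) (fuel : Nat) : List Int :=
  match fuel with
  | 0 => []
  | Nat.succ fuel =>
    if i = n then []
    else i :: genA_loop n (if i < 0 then -i + 1 else -i) fuel

def gen_inc_nz_integers (n : Int) : List Int := genA_loop n 1 (2 * n.natAbs)

-- ===== PORT B =====
-- B: m = 2*(n-1) if n > 0 else 2*(-n)-1; for j in range(m): k = j//2 + 1; yield k or -k by parity.
def gen_inc_nz_integers_alt (n : Int) : List Int :=
  let m : Int := if n > 0 then 2 * (n - 1) else 2 * (-n) - 1
  (PySem.List.pyRange 0 m 1).map (fun j =>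
    let k := PySem.Int.floordiv j 2 + 1
    if PySem.Int.mod j 2 = 0 then k else -k)

-- ===== PRECONDITION & SPEC =====
-- Pre_ excludes n = 0, on which A's generator never terminates (it yields 1,-1,2,-2,... forever).
def Pre_gen_inc_nz_integers (n : Int) : Prop := n ≠ 0
instance (n : Int) : Decidable (Pre_gen_inc_nz_integers n) := by unfold Pre_gen_inc_nz_integers; infer_instance
def pvWitness_gen_inc_nz_integers : Int := 3

def Spec_gen_inc_nz_integers (n : Int) (out : List Int) : Prop := out = gen_inc_nz_integers_alt n
instance (n : Int) (out : List Int) : Decidable (Spec_gen_inc_nz_integers n out) := by unfold Spec_gen_inc_nz_integers; infer_instance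

-- ===== CLAIM =====
def Claim_equal_gen_inc_nz_integers : Prop := ∀ (n : Int), Dom_gen_inc_nz_integers n → Pre_gen_inc_nz_integers n → Spec_gen_inc_nz_integers n (gen_inc_nz_integers n)

-- ===== LEMMAS AND PROOFS =====

-- Closed-form element at index j (Nat form), matching B's loop body for j ≥ 0.
def pvElem (j : Nat) : Int := if j % 2 = 0 then (j / 2 : Nat) + 1 else -((j / 2 : Nat) + 1)

theorem genA_succ (n i : Int) (fuel : Nat) :
    genA_loop n i (fuel + 1) =
      if i = n then [] else i :: genA_loop n (if i < 0 then -i + 1 else -i) fuel := rfl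

-- Two iterations of A's loop from signed state k ≥ 1 (neither k nor -k is n) yield k, -k.
theorem genA_two_step (n k : Int) (f : Nat) (hk : 1 ≤ k) (hkn : ¬ k = n) (hmkn : ¬ -k = n) :
    genA_loop n k (f + 2) = k :: -k :: genA_loop n (k + 1) f := by
  rw [show f + 2 = (f + 1) + 1 from rfl, genA_succ, if_neg hkn,
      if_neg (show ¬ k < 0 by omega), genA_succ, if_neg hmkn,
      if_pos (show -k < 0 by omega), neg_neg]

theorem pvElem_even (t : Nat) : pvElem (2 * t) = (t : Int) + 1 := by
  unfold pvElem
  have h1 : 2 * t % 2 = 0 := by omega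
  have h2 : 2 * t / 2 = t := by omega
  simp [h1, h2]

theorem pvElem_odd (t : Nat) : pvElem (2 * t + 1) = -((t : Int) + 1) := by
  unfold pvElem
  have h1 : (2 * t + 1) % 2 = 1 := by omega
  have h2 : (2 * t + 1) / 2 = t := by omega
  simp [h1, h2]

-- Heads-and-tail form of a map over List.range (c + 2).
theorem range_shift_cons (c : Nat) (g : Nat → Int) :
    (List.range (c + 2)).map g = g 0 :: g 1 :: (List.range c).map (fun j => g (j + 2)) := by
  rw [show c + 2 = (c + 1) + 1 from rfl, List.range_succ_eq_map, List.range_succ_eq_map]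
  simp only [List.map_cons, List.map_map]
  rfl

-- Positive target n = k + f: A's loop from state k yields the 2f closed-form
-- elements with index offset 2(k-1); any extra fuel e is unused.
theorem genA_pos (n : Int) (e : Nat) : ∀ (f : Nat) (k : Int), 1 ≤ k → n = k + f →
    genA_loop n k (2 * f + 1 + e) =
      (List.range (2 * f)).map (fun j => pvElem (j + 2 * (k - 1).toNat)) := by
  intro f
  induction f with
  | zero =>
    intro k hk hn
    rw [show 2 * 0 + 1 + e = e + 1 by omega, genA_succ, if_pos (show k = n by omega)]
    simp
  | succ f ih =>
    intro k hk hn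
    rw [show 2 * (f + 1) + 1 + e = (2 * f + 1 + e) + 2 by omega,
        genA_two_step n k _ hk (by omega) (by omega),
        ih (k + 1) (by omega) (by omega),
        show 2 * (f + 1) = 2 * f + 2 by omega, range_shift_cons]
    congr 1
    · show k = pvElem (0 + 2 * (k - 1).toNat)
      rw [show 0 + 2 * (k - 1).toNat = 2 * (k - 1).toNat by omega, pvElem_even]
      omega
    congr 1
    · show -k = pvElem (1 + 2 * (k - 1).toNat)
      rw [show 1 + 2 * (k - 1).toNat = 2 * (k - 1).toNat + 1 by omega, pvElem_odd]
      omega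
    refine List.map_congr_left (fun j _ => ?_)
    show pvElem (j + 2 * (k + 1 - 1).toNat) = pvElem (j + 2 + 2 * (k - 1).toNat)
    congr 1
    omega

-- Negative target n = -(k + f): A's loop from state k yields the 2f + 1
-- closed-form elements with index offset 2(k-1), on exactly 2f + 2 fuel.
theorem genA_neg (n : Int) : ∀ (f : Nat) (k : Int), 1 ≤ k → n = -(k + f) →
    genA_loop n k (2 * f + 2) =
      (List.range (2 * f + 1)).map (fun j => pvElem (j + 2 * (k - 1).toNat)) := by
  intro f
  induction f with
  | zero =>
    intro k hk hn
    rw [show 2 * 0 + 2 = 1 + 1 from rfl, genA_succ, if_neg (show ¬ k = n by omega),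
        if_neg (show ¬ k < 0 by omega), genA_succ, if_pos (show -k = n by omega),
        show List.range (2 * 0 + 1) = [0] from rfl]
    simp only [List.map_cons, List.map_nil]
    congr 1
    rw [show 0 + 2 * (k - 1).toNat = 2 * (k - 1).toNat by omega, pvElem_even]
    omega
  | succ f ih =>
    intro k hk hn
    rw [show 2 * (f + 1) + 2 = (2 * f + 2) + 2 by omega,
        genA_two_step n k _ hk (by omega) (by omega),
        ih (k + 1) (by omega) (by omega),
        show 2 * (f + 1) + 1 = (2 * f + 1) + 2 by omega, range_shift_cons]
    congr 1
    · show k = pvElem (0 + 2 * (k - 1).toNat)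
      rw [show 0 + 2 * (k - 1).toNat = 2 * (k - 1).toNat by omega, pvElem_even]
      omega
    congr 1
    · show -k = pvElem (1 + 2 * (k - 1).toNat)
      rw [show 1 + 2 * (k - 1).toNat = 2 * (k - 1).toNat + 1 by omega, pvElem_odd]
      omega
    refine List.map_congr_left (fun j _ => ?_)
    show pvElem (j + 2 * (k + 1 - 1).toNat) = pvElem (j + 2 + 2 * (k - 1).toNat)
    congr 1
    omega

-- B's loop body on a nonnegative index equals pvElem of its Nat value.
theorem alt_body_eq_pvElem (j : Nat) :
    (let k := PySem.Int.floordiv (j : Int) 2 + 1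
     if PySem.Int.mod (j : Int) 2 = 0 then k else -k) = pvElem j := by
  have hd : PySem.Int.floordiv (j : Int) 2 = ((j / 2 : Nat) : Int) := by
    exact_mod_cast PySem.Int.floordiv_natCast j 2
  have hm : PySem.Int.mod (j : Int) 2 = ((j % 2 : Nat) : Int) := by
    exact_mod_cast PySem.Int.mod_natCast j 2
  simp only [hd, hm, pvElem]
  by_cases h : j % 2 = 0
  · simp [h]
  · have h1 : j % 2 = 1 := by omega
    simp [h1]

-- B's port rewritten as a map of pvElem over List.range.
theorem alt_eq_range_map (n : Int) :
    gen_inc_nz_integers_alt n =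
      (List.range (if n > 0 then 2 * (n - 1) else 2 * (-n) - 1).toNat).map pvElem := by
  show (PySem.List.pyRange 0 (if n > 0 then 2 * (n - 1) else 2 * (-n) - 1) 1).map
      (fun j => let k := PySem.Int.floordiv j 2 + 1
                if PySem.Int.mod j 2 = 0 then k else -k) = _
  rw [PySem.List.pyRange_one, List.map_map]
  rw [show ((if n > 0 then 2 * (n - 1) else 2 * (-n) - 1) - 0) =
        (if n > 0 then 2 * (n - 1) else 2 * (-n) - 1) by ring]
  apply List.map_congr_left
  intro j _
  simp only [Function.comp_apply, Int.zero_add]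
  exact alt_body_eq_pvElem j

-- ===== VERDICT =====
theorem gen_inc_nz_integers_spec : Claim_equal_gen_inc_nz_integers := by
  intro n _ hn
  show gen_inc_nz_integers n = gen_inc_nz_integers_alt n
  rw [alt_eq_range_map]
  unfold gen_inc_nz_integers
  rcases lt_or_gt_of_ne hn with hneg | hpos
  · rw [if_neg (show ¬ n > 0 by omega),
        show 2 * n.natAbs = 2 * (n.natAbs - 1) + 2 by omega,
        genA_neg n (n.natAbs - 1) 1 (by omega) (by omega),
        show (2 * (-n) - 1).toNat = 2 * (n.natAbs - 1) + 1 by omega]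
    refine List.map_congr_left (fun j _ => ?_)
    rw [show j + 2 * ((1 : Int) - 1).toNat = j by omega]
  · rw [if_pos hpos,
        show 2 * n.natAbs = 2 * (n.natAbs - 1) + 1 + 1 by omega,
        genA_pos n 1 (n.natAbs - 1) 1 (by omega) (by omega),
        show (2 * (n - 1)).toNat = 2 * (n.natAbs - 1) by omega]
    refine List.map_congr_left (fun j _ => ?_)
    rw [show j + 2 * ((1 : Int) - 1).toNat = j by omega]
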